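-- pv_equiv track=rewrite | github.com/sathish39893/AutoIncrementCompile | ObjectListGenerator.py | getRepoNonRepoType
-- ===== SOURCE A (Python) =====
-- def getRepoNonRepoType(ObjType):
-- 	ObjTypeList ={'SRF':['Bitmap Category','Business Component','Business Object','Business Service','Class','Find','HTML Heirarchy Bitmap','Help Id','Icon Map','Integration Object',
-- 						'Application','Applet','Link','Menu','Message Category','Pick List','Project','Screen','Symbolic String','Table','Task Group','Toolbar','View','Web Page',
-- 						'Import Object'],
-- 				'Non-SRF':['List Of Values','Web Service','EAI DataMap','Application DataMap','Workflow','Workflow Policy','SWT Files','JS Files','CSS Files']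
-- 				}
-- 	for k in ObjTypeList:
-- 		if k == ObjType:
-- 			return k
-- 		else:
-- 			for v in ObjTypeList[k]:
-- 				if ObjType == v:
-- 					return k
-- 	return None
-- ===== SOURCE B (Python) =====
-- _CATEGORIES = {'SRF': ['Bitmap Category', 'Business Component', 'Business Object', 'Business Service', 'Class', 'Find', 'HTML Heirarchy Bitmap', 'Help Id', 'Icon Map', 'Integration Object',
--                        'Application', 'Applet', 'Link', 'Menu', 'Message Category', 'Pick List', 'Project', 'Screen', 'Symbolic String', 'Table', 'Task Group', 'Toolbar', 'View', 'Web Page',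
--                        'Import Object'],
--                'Non-SRF': ['List Of Values', 'Web Service', 'EAI DataMap', 'Application DataMap', 'Workflow', 'Workflow Policy', 'SWT Files', 'JS Files', 'CSS Files']}
--
-- # flat index built once: each category maps to itself, each member name maps to its category
-- _LOOKUP = {name: cat for cat, names in _CATEGORIES.items() for name in [cat, *names]}
--
--
-- def getRepoNonRepoType(ObjType):
--     return _LOOKUP.get(ObjType)
-- ===== Notes on version B (the rewrite author's own statement) =====
-- stated objective: idiomatic
-- what changed: Replaces the nested key/value scan with a flat dict built once (each category maps to itself and each member name to its category), so the body is a single dict lookup.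
import Mathlib
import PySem

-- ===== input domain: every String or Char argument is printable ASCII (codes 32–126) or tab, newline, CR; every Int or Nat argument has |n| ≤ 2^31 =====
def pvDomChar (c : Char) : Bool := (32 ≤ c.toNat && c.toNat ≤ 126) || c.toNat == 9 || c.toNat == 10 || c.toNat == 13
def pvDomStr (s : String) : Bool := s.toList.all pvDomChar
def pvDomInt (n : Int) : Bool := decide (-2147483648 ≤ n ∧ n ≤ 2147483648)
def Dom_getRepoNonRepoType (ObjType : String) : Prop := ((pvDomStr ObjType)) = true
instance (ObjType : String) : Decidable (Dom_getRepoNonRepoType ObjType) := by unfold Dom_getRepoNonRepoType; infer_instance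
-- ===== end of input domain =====

-- B replaces A's nested key/value scan with a flat dict built once (idiomatic; same exact values).

-- ===== PORT A =====
-- the literal dict from A's body
def pvObjTypeList : List (String × List String) :=
  [("SRF", ["Bitmap Category", "Business Component", "Business Object", "Business Service", "Class", "Find", "HTML Heirarchy Bitmap", "Help Id", "Icon Map", "Integration Object",
            "Application", "Applet", "Link", "Menu", "Message Category", "Pick List", "Project", "Screen", "Symbolic String", "Table", "Task Group", "Toolbar", "View", "Web Page",
            "Import Object"]),
   ("Non-SRF", ["List Of Values", "Web Service", "EAI DataMap", "Application DataMap", "Workflow", "Workflow Policy", "SWT Files", "JS Files", "CSS Files"])]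

-- the inner 'for v in ObjTypeList[k]' loop
def pvInnerA (ObjType k : String) : List String → Option String
  | [] => none
  | v :: rest => if ObjType == v then some k else pvInnerA ObjType k rest

-- the outer 'for k in ObjTypeList' loop
def pvOuterA (ObjType : String) : List (String × List String) → Option String
  | [] => none
  | (k, vs) :: rest =>
      if k == ObjType then some k
      else match pvInnerA ObjType k vs with
           | some r => some r
           | none => pvOuterA ObjType rest

def getRepoNonRepoType (ObjType : String) : Option String :=
  pvOuterA ObjType pvObjTypeList

-- ===== PORT B =====
def pvCategories : List (String × List String) := pvObjTypeList

-- the flat lookup dict: {name: cat for cat, names in _CATEGORIES.items() for name in [cat, *names]}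
def pvLookup : PySem.Dict String String :=
  pvCategories.foldl
    (fun d p => (p.1 :: p.2).foldl (fun d name => d.insert name p.1) d)
    (PySem.Dict.mk [])

def getRepoNonRepoType_alt (ObjType : String) : Option String :=
  pvLookup.get? ObjType

-- ===== PRECONDITION & SPEC =====
def Spec_getRepoNonRepoType (ObjType : String) (out : Option String) : Prop := out = getRepoNonRepoType_alt ObjType
instance (ObjType : String) (out : Option String) : Decidable (Spec_getRepoNonRepoType ObjType out) := by unfold Spec_getRepoNonRepoType; infer_instance

-- ===== CLAIM (what is proved, stated in full; the proofs are below) =====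
def Claim_equal_getRepoNonRepoType : Prop := ∀ (ObjType : String), Dom_getRepoNonRepoType ObjType → Spec_getRepoNonRepoType ObjType (getRepoNonRepoType ObjType)

-- ===== LEMMAS AND PROOFS =====
-- flatten the category structure into the association list the lookup dict holds
def pvFlat (items : List (String × List String)) : List (String × String) :=
  items.flatMap (fun p => (p.1 :: p.2).map (fun n => (n, p.1)))

-- A's inner loop, continued by a dict lookup on a tail, is a lookup on the prepended pairs
theorem pvInner_chain (s k : String) (vs : List String) (tail : List (String × String)) :
    (match pvInnerA s k vs with
     | some r => some r
     | none => (PySem.Dict.mk tail).get? s)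
      = (PySem.Dict.mk (vs.map (fun n => (n, k)) ++ tail)).get? s := by
  induction vs with
  | nil => simp [pvInnerA]
  | cons v vs ih =>
      simp only [pvInnerA, List.map_cons, List.cons_append, PySem.Dict.get?_mk_cons]
      by_cases h : s = v
      · subst h; simp
      · simp only [beq_iff_eq, h, if_false, Ne.symm h, ← ih]

-- A's outer loop is a single lookup in the flattened dict
theorem pvOuter_chain (s : String) (items : List (String × List String)) :
    pvOuterA s items = (PySem.Dict.mk (pvFlat items)).get? s := by
  induction items with
  | nil => simp [pvOuterA, pvFlat, PySem.Dict.get?]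
  | cons p rest ih =>
      obtain ⟨k, vs⟩ := p
      simp only [pvOuterA, pvFlat, List.flatMap_cons, List.map_cons, List.cons_append,
        PySem.Dict.get?_mk_cons]
      by_cases h : k = s
      · subst h; simp
      · simp only [beq_iff_eq, h, if_false]
        rw [ih]
        exact pvInner_chain s k vs (pvFlat rest)

set_option maxRecDepth 10000 in
-- B's insert-folds build exactly the flattened dict (all keys are distinct)
theorem pvLookup_eq : pvLookup = PySem.Dict.mk (pvFlat pvObjTypeList) := by decide

-- ===== VERDICT (by name: the statement is the Claim_ definition above) =====
theorem getRepoNonRepoType_spec : Claim_equal_getRepoNonRepoType := by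
  intro s _
  unfold Spec_getRepoNonRepoType getRepoNonRepoType getRepoNonRepoType_alt
  rw [pvLookup_eq, pvOuter_chain]
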